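-- pv_equiv track=rewrite | github.com/ivellios/advent-of-code-2023 | src/aoc/day_03/__init__.py | find_all_numbers_in_string
-- ===== SOURCE A (Python) =====
-- def find_all_numbers_in_string(value) -> dict[int, str]:
--     """
--     Returns a dict of positions where each number starts as keys
--     and the numbers themselves as values.
--     """
--     numbers = {}
--     number = ""
--     for idx, char in enumerate(value):
--         if char.isdigit():
--             number += char
--         elif number:
--             numbers[idx - len(number)] = number
--             number = ""
--     if number:
--         numbers[len(value) - len(number)] = number
--     return numbers
-- ===== SOURCE B (Python) =====
-- from itertools import groupby
--
--
-- def find_all_numbers_in_string(value) -> dict[int, str]: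
--     """
--     Returns a dict of positions where each number starts as keys
--     and the numbers themselves as values.
--     """
--     numbers = {}
--     idx = 0
--     for key, group in groupby(value, key=str.isdigit):
--         s = "".join(group)
--         if key:
--             numbers[idx] = s
--         idx += len(s)
--     return numbers
-- ===== Notes on version B (the rewrite author's own statement) =====
-- stated objective: alternative
-- what changed: Replaced the char-by-char scan with a mutable accumulator string by splitting the input into maximal digit/non-digit runs via itertools.groupby and folding them with a running start index.
import Mathlib
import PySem

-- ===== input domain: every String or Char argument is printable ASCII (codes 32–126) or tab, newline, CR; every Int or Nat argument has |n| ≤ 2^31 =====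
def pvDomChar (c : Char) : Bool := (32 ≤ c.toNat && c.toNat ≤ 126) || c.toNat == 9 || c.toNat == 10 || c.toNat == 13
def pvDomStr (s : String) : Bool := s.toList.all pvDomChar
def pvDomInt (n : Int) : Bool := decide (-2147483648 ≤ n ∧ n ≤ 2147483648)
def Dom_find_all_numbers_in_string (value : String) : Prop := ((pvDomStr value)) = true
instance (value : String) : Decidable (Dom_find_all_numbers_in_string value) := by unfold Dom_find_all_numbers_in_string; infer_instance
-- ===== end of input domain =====

-- B replaces A's char-by-char scan with accumulator string by a split of the input into
-- maximal digit/non-digit runs (itertools.groupby) folded with a running start index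
-- (objective: alternative decomposition, same asymptotic cost).


-- ===== PORT A =====
-- A's loop body: state = (numbers dict, current digit run); the run is kept as List Char
-- (Python's string concatenation 'number += char'), converted by String.ofList at insertion.
def pvAStep (st : PySem.Dict Int String × List Char) (p : Int × Char) :
    PySem.Dict Int String × List Char :=
  if PySem.Chars.isdigit p.2 then (st.1, st.2 ++ [p.2])
  else if st.2 ≠ [] then (st.1.insert (p.1 - st.2.length) (String.ofList st.2), [])
  else st

-- A's trailing 'if number: numbers[len(value) - len(number)] = number; return numbers'
def pvAFinish (n : Int) (st : PySem.Dict Int String × List Char) : List (Int × String) :=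
  match st with
  | (numbers, number) =>
    if number ≠ [] then (numbers.insert (n - number.length) (String.ofList number)).items
    else numbers.items

def find_all_numbers_in_string (value : String) : List (Int × String) :=
  pvAFinish (value.toList.length : Int)
    ((PySem.List.enumerate value.toList 0).foldl pvAStep (PySem.Dict.empty, []))

-- ===== PORT B =====
-- itertools.groupby(value, key=str.isdigit): list of (key, maximal run with that key)
def pvBGroups (cs : List Char) : List (Bool × List Char) :=
  match cs with
  | [] => []
  | c :: rest =>
    let k := PySem.Chars.isdigit c
    (k, c :: rest.takeWhile (fun x => PySem.Chars.isdigit x == k)) ::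
      pvBGroups (rest.dropWhile (fun x => PySem.Chars.isdigit x == k))
termination_by cs.length
decreasing_by
  simp only [List.length_cons]
  exact Nat.lt_succ_of_le (List.length_dropWhile_le _ _)

-- B's loop body: state = (numbers dict, running index)
def pvBStep (st : PySem.Dict Int String × Int) (p : Bool × List Char) :
    PySem.Dict Int String × Int :=
  ((if p.1 then st.1.insert st.2 (String.ofList p.2) else st.1), st.2 + p.2.length)

def find_all_numbers_in_string_alt (value : String) : List (Int × String) :=
  ((pvBGroups value.toList).foldl pvBStep (PySem.Dict.empty, 0)).1.items

-- ===== PRECONDITION & SPEC =====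
def Spec_find_all_numbers_in_string (value : String) (out : List (Int × String)) : Prop := out = find_all_numbers_in_string_alt value
instance (value : String) (out : List (Int × String)) : Decidable (Spec_find_all_numbers_in_string value out) := by unfold Spec_find_all_numbers_in_string; infer_instance

-- ===== CLAIM (what is proved, stated in full; the proofs are below) =====
def Claim_equal_find_all_numbers_in_string : Prop := ∀ (value : String), Dom_find_all_numbers_in_string value → Spec_find_all_numbers_in_string value (find_all_numbers_in_string value)

-- ===== LEMMAS AND PROOFS =====

-- common reference: the (start, digit-run) pairs of cs, runs taken wholesale
def pvRef (i : Int) (cs : List Char) : List (Int × String) :=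
  match cs with
  | [] => []
  | c :: rest =>
    if PySem.Chars.isdigit c then
      (i, String.ofList (c :: rest.takeWhile PySem.Chars.isdigit)) ::
        pvRef (i + 1 + (rest.takeWhile PySem.Chars.isdigit).length)
          (rest.dropWhile PySem.Chars.isdigit)
    else pvRef (i + 1) rest
termination_by cs.length
decreasing_by
  · simp only [List.length_cons]
    exact Nat.lt_succ_of_le (List.length_dropWhile_le _ _)
  · simp

lemma pvRef_skip (g : List Char) (hg : ∀ c ∈ g, PySem.Chars.isdigit c = false) :
    ∀ (i : Int) (t : List Char), pvRef i (g ++ t) = pvRef (i + g.length) t := by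
  induction g with
  | nil => intro i t; simp
  | cons c g ih =>
    intro i t
    have hc := hg c (by simp)
    rw [List.cons_append, pvRef, if_neg (by simp [hc])]
    rw [ih (fun x hx => hg x (by simp [hx])) (i + 1) t]
    congr 1
    push_cast [List.length_cons]
    ring

lemma pvRef_run (cur : List Char) (c : Char) (cur' : List Char) (hc : cur = c :: cur')
    (hcur : ∀ x ∈ cur, PySem.Chars.isdigit x = true) (i : Int) (t : List Char) :
    pvRef i (cur ++ t) =
      (i, String.ofList (cur ++ t.takeWhile PySem.Chars.isdigit)) ::
        pvRef (i + cur.length + (t.takeWhile PySem.Chars.isdigit).length)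
          (t.dropWhile PySem.Chars.isdigit) := by
  subst hc
  have hc' : PySem.Chars.isdigit c = true := hcur c (by simp)
  have hcur' : ∀ x ∈ cur', PySem.Chars.isdigit x = true := fun x hx => hcur x (by simp [hx])
  rw [List.cons_append, pvRef, if_pos hc']
  rw [List.takeWhile_append_of_pos hcur', List.dropWhile_append_of_pos hcur']
  simp only [List.cons_append]
  congr 2
  push_cast [List.length_cons, List.length_append]
  ring

lemma pvNotContains (d : PySem.Dict Int String) (k : Int) (h : k ∉ d.keys) :
    d.contains k = false := by
  rcases hb : d.contains k with _ | _
  · rfl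
  · exact absurd ((PySem.Dict.contains_iff_mem_keys d k).1 hb) h

lemma pvA_loop (cs : List Char) : ∀ (i : Int) (d : PySem.Dict Int String) (cur : List Char),
    (∀ x ∈ cur, PySem.Chars.isdigit x = true) →
    (∀ k ∈ d.keys, k < i - cur.length) →
    pvAFinish (i + cs.length) ((PySem.List.enumerate cs i).foldl pvAStep (d, cur)) =
      d.items ++ pvRef (i - cur.length) (cur ++ cs) := by
  induction cs with
  | nil =>
    intro i d cur hcur hd
    simp only [PySem.List.enumerate_nil, List.foldl_nil, List.length_nil, List.append_nil,
      Nat.cast_zero, add_zero]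
    match cur, hcur, hd with
    | [], _, _ =>
      simp [pvAFinish, pvRef]
    | c :: cur', hcur, hd =>
      rw [pvAFinish, if_pos (by simp)]
      rw [PySem.Dict.items_insert_of_not_contains _ _
        (pvNotContains d _ (fun hmem => absurd (hd _ hmem) (by omega)))]
      have hrun := pvRef_run (c :: cur') c cur' rfl hcur (i - ((c :: cur').length : Int)) []
      rw [List.append_nil] at hrun
      rw [hrun]
      have htw : List.takeWhile PySem.Chars.isdigit ([] : List Char) = [] := rfl
      simp only [htw, List.append_nil, List.length_nil, Nat.cast_zero, add_zero]
      simp [pvRef]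
  | cons c cs ih =>
    intro i d cur hcur hd
    rw [PySem.List.enumerate_cons, List.foldl_cons]
    by_cases hdig : PySem.Chars.isdigit c = true
    · rw [show pvAStep (d, cur) (i, c) = (d, cur ++ [c]) by simp [pvAStep, hdig]]
      rw [show i + (((c :: cs).length : Nat) : Int) = (i + 1) + ((cs.length : Nat) : Int) by
        push_cast [List.length_cons]; ring]
      rw [ih (i + 1) d (cur ++ [c])
        (by intro x hx; rcases List.mem_append.1 hx with h | h
            · exact hcur x h
            · simp at h; subst h; exact hdig)
        (by intro k hk; have := hd k hk; simp only [List.length_append, List.length_cons,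
              List.length_nil]; push_cast; omega)]
      simp only [List.length_append, List.length_cons, List.length_nil, List.append_assoc,
        List.cons_append, List.nil_append]
      congr 2
      push_cast; ring
    · match cur, hcur with
      | [], _ =>
        rw [show pvAStep (d, []) (i, c) = (d, []) by simp [pvAStep, hdig]]
        rw [show i + (((c :: cs).length : Nat) : Int) = (i + 1) + ((cs.length : Nat) : Int) by
          push_cast [List.length_cons]; ring]
        rw [ih (i + 1) d [] (by simp) (by intro k hk; have := hd k hk; omega)]
        simp only [List.nil_append, List.length_nil]
        rw [pvRef, if_neg hdig]
        congr 2
        push_cast; ring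
      | c0 :: cur', hcur =>
        rw [show pvAStep (d, c0 :: cur') (i, c)
            = (d.insert (i - (c0 :: cur').length) (String.ofList (c0 :: cur')), []) by
          simp [pvAStep, hdig]]
        rw [show i + (((c :: cs).length : Nat) : Int) = (i + 1) + ((cs.length : Nat) : Int) by
          push_cast [List.length_cons]; ring]
        rw [ih (i + 1) _ [] (by simp)
          (by intro k hk
              rcases (PySem.Dict.mem_keys_insert _ _ _ _).1 hk with h | h
              · subst h; simp only [List.length_nil, List.length_cons]; push_cast; omega
              · have := hd k h; simp at *; omega)]
        rw [PySem.Dict.items_insert_of_not_contains _ _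
          (pvNotContains d _ (fun hmem => absurd (hd _ hmem) (by omega)))]
        rw [pvRef_run (c0 :: cur') c0 cur' rfl hcur _ (c :: cs)]
        have htw : List.takeWhile PySem.Chars.isdigit (c :: cs) = [] := by
          rw [List.takeWhile_cons_of_neg (by simp [hdig])]
        have hdw : List.dropWhile PySem.Chars.isdigit (c :: cs) = c :: cs := by
          rw [List.dropWhile_cons_of_neg (by simp [hdig])]
        rw [htw, hdw, pvRef, if_neg hdig]
        simp only [List.append_nil, List.length_nil, List.append_assoc, List.cons_append,
          List.nil_append, List.length_cons]
        push_cast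
        norm_num

lemma pvB_loop : ∀ (n : Nat) (cs : List Char), cs.length ≤ n →
    ∀ (i : Int) (d : PySem.Dict Int String),
    (∀ k ∈ d.keys, k < i) →
    ((pvBGroups cs).foldl pvBStep (d, i)).1.items = d.items ++ pvRef i cs := by
  intro n
  induction n with
  | zero =>
    intro cs hlen i d hd
    match cs, hlen with
    | [], _ => simp [pvBGroups, pvRef]
  | succ n ih =>
    intro cs hlen i d hd
    match cs with
    | [] => simp [pvBGroups, pvRef]
    | c :: rest =>
      rw [pvBGroups]
      by_cases hdig : PySem.Chars.isdigit c = true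
      · simp only [hdig]
        have hq : (fun x => PySem.Chars.isdigit x == true) = PySem.Chars.isdigit := by
          funext x; simp
        rw [List.foldl_cons,
          show pvBStep (d, i) (true, c :: rest.takeWhile (fun x => PySem.Chars.isdigit x == true))
            = (d.insert i (String.ofList (c :: rest.takeWhile PySem.Chars.isdigit)),
               i + (1 + (rest.takeWhile PySem.Chars.isdigit).length)) by
            simp [pvBStep]
            ring_nf]
        rw [hq]
        rw [ih (rest.dropWhile PySem.Chars.isdigit)
          (by have := List.length_dropWhile_le PySem.Chars.isdigit rest; simp at hlen; omega)
          _ _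
          (by intro k hk
              rcases (PySem.Dict.mem_keys_insert _ _ _ _).1 hk with h | h
              · subst h; omega
              · have := hd k h; omega)]
        rw [PySem.Dict.items_insert_of_not_contains _ _
          (pvNotContains d _ (fun hmem => absurd (hd _ hmem) (by omega)))]
        rw [pvRef, if_pos hdig]
        simp only [List.append_assoc, List.cons_append, List.nil_append]
        congr 3
        ring
      · have hdig' : PySem.Chars.isdigit c = false := by
          rcases hb : PySem.Chars.isdigit c with _ | _
          · rfl
          · exact absurd hb hdig
        simp only [hdig']
        rw [List.foldl_cons,
          show pvBStep (d, i) (false, c :: rest.takeWhile (fun x => PySem.Chars.isdigit x == false))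
            = (d, i + (1 + (rest.takeWhile (fun x => PySem.Chars.isdigit x == false)).length)) by
            simp [pvBStep]; ring_nf]
        rw [ih (rest.dropWhile (fun x => PySem.Chars.isdigit x == false))
          (by have := List.length_dropWhile_le (fun x => PySem.Chars.isdigit x == false) rest
              simp at hlen; omega)
          _ _ (by intro k hk; have := hd k hk; omega)]
        rw [pvRef, if_neg (by simp [hdig'])]
        have hsplit : rest = rest.takeWhile (fun x => PySem.Chars.isdigit x == false)
            ++ rest.dropWhile (fun x => PySem.Chars.isdigit x == false) :=
          (List.takeWhile_append_dropWhile).symm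
        conv_rhs => rw [hsplit]
        rw [pvRef_skip _ (fun x hx => by
          have := List.mem_takeWhile_imp hx
          simpa using this)]
        congr 1
        ring_nf

-- ===== VERDICT (by name: the statement is the Claim_ definition above) =====
theorem find_all_numbers_in_string_spec : Claim_equal_find_all_numbers_in_string := by
  intro value _
  unfold Spec_find_all_numbers_in_string find_all_numbers_in_string find_all_numbers_in_string_alt
  rw [show ((value.toList.length : Int)) = 0 + (value.toList.length : Int) by ring]
  rw [pvA_loop value.toList 0 PySem.Dict.empty []
    (by simp)
    (by intro k hk; simp [PySem.Dict.keys, PySem.Dict.empty] at hk)]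
  rw [pvB_loop value.toList.length value.toList le_rfl 0 PySem.Dict.empty
    (by intro k hk; simp [PySem.Dict.keys, PySem.Dict.empty] at hk)]
  simp
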